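-- pv_equiv track=rewrite | github.com/jbhong/uwa-study-planner | prerequisite_checker.py | get_next_unit_code
-- ===== SOURCE A (Python) =====
-- def get_next_unit_code(ucode, bound=90, start='A') -> str:
--     """ ucode is the unit code, which is always 4 letters and 4 digits
--         A-Z ord is 65 to 90.
--         0-0 ord is 48 to 57.
--         Call with bound 90 and start 'A' for letter code
--         Call with bound 57 and start '0' for number code
--     """
--     ucode = list(ucode)
--     char_ind = 3          #start with the last letter
--
--     #past Z so increment the next letter
--     while char_ind >= 0:
--         if ord(ucode[char_ind]) + 1 > bound:
--             ucode[char_ind] = start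
--         else:
--             ucode[char_ind] = chr(ord(ucode[char_ind]) + 1)
--             char_ind = 0
--         char_ind -= 1
--
--     return ''.join(ucode)
-- ===== SOURCE B (Python) =====
-- def get_next_unit_code(ucode, bound=90, start='A') -> str:
--     # Per-position rule, no carry loop: a position wraps iff it and every
--     # position to its right (within the first four) is at the bound; it is
--     # incremented iff it does not wrap but everything to its right does.
--     w = [ord(ucode[i]) >= bound for i in range(4)]
--
--     def cell(i):
--         if all(w[i:]):
--             return start
--         if all(w[i + 1:]):
--             return chr(ord(ucode[i]) + 1)
--         return ucode[i]
--
--     return ''.join(cell(i) for i in range(4)) + ucode[4:]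
-- ===== Notes on version B (the rewrite author's own statement) =====
-- stated objective: alternative
-- what changed: A propagates a carry right-to-left through a mutable list with an index that is decremented and reset; B has no carry state at all: it precomputes a wrap flag per position and classifies each of the four output positions independently (start / incremented / unchanged) from suffix-all predicates over those flags, then joins.
import Mathlib
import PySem

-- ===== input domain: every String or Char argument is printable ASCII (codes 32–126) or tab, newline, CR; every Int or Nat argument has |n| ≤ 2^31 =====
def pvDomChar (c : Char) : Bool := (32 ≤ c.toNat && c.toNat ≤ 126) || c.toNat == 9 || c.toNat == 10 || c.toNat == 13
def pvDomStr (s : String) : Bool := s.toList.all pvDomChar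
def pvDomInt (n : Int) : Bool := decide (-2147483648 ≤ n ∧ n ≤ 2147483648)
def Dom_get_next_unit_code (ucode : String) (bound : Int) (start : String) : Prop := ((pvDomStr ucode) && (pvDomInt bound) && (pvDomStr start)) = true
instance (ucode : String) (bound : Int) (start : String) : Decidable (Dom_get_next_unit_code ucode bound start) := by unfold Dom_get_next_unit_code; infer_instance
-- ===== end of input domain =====

-- B replaces A's mutating carry loop by a carry-free per-position classification driven by
-- suffix-all predicates over precomputed wrap flags (objective: alternative); equal wherever A returns.

-- ===== PORT A =====
-- Python's working list of strings is represented as List (List Char); join at the end.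
def pvLoopA (bound : Int) (start : List Char) (cs : List (List Char)) (i : Nat) : List (List Char) :=
  match PySem.List.pyGet? cs (i : Int) with
  | none => cs                      -- IndexError; never reached under Pre_
  | some s =>
    match s with
    | [c] =>
      if (c.toNat : Int) + 1 > bound then
        match i with
        | 0 => cs.set 0 start
        | j+1 => pvLoopA bound start (cs.set (j+1) start) j
      else cs.set i [Char.ofNat (c.toNat + 1)]   -- then char_ind := 0; char_ind -= 1 exits the loop
    | _ => cs                       -- ord() on a non-1-char string raises; unreachable (list(ucode) gives single chars)

def get_next_unit_code (ucode : String) (bound : Int) (start : String) : String :=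
  String.ofList (PySem.Chars.join [] (pvLoopA bound start.toList (ucode.toList.map (fun c => [c])) 3))

-- ===== PORT B =====
def get_next_unit_code_alt (ucode : String) (bound : Int) (start : String) : String :=
  let cs := ucode.toList
  -- w = [ord(ucode[i]) >= bound for i in range(4)]  (getD ' ' stands for the index; only reached under Pre_)
  let w := (List.range 4).map (fun i => decide (bound ≤ ((cs.getD i ' ').toNat : Int)))
  let cell := fun (i : Nat) =>
    if (w.drop i).all id then start.toList
    else if (w.drop (i+1)).all id then [Char.ofNat ((cs.getD i ' ').toNat + 1)]
    else [cs.getD i ' ']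
  String.ofList (((List.range 4).map cell).flatten ++ PySem.List.slice cs (some 4) none)

-- ===== PRECONDITION & SPEC =====
-- Pre_ excludes exactly the strings shorter than 4 characters, on which A raises IndexError (B raises the same).
def Pre_get_next_unit_code (ucode : String) (bound : Int) (start : String) : Prop :=
  4 ≤ ucode.toList.length
instance (ucode : String) (bound : Int) (start : String) : Decidable (Pre_get_next_unit_code ucode bound start) := by unfold Pre_get_next_unit_code; infer_instance

def pvWitness_get_next_unit_code : String × Int × String := ("ABCZ", 90, "A")

def Spec_get_next_unit_code (ucode : String) (bound : Int) (start : String) (out : String) : Prop := out = get_next_unit_code_alt ucode bound start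
instance (ucode : String) (bound : Int) (start : String) (out : String) : Decidable (Spec_get_next_unit_code ucode bound start out) := by unfold Spec_get_next_unit_code; infer_instance

-- ===== CLAIM (what is proved, stated in full; the proofs are below) =====
def Claim_equal_get_next_unit_code : Prop := ∀ (ucode : String) (bound : Int) (start : String), Dom_get_next_unit_code ucode bound start → Pre_get_next_unit_code ucode bound start → Spec_get_next_unit_code ucode bound start (get_next_unit_code ucode bound start)

-- ===== LEMMAS AND PROOFS =====

-- join with the empty separator is flatten
theorem pv_join_nil_flatten (l : List (List Char)) : PySem.Chars.join [] l = l.flatten := by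
  simp only [PySem.Chars.join, List.intercalate]
  induction l with
  | nil => rfl
  | cons a t ih => cases t <;> simp_all [List.intersperse]

-- the five outcomes of A's loop on a length-≥-4 list
theorem pvLoopA_case0 (c0 c1 c2 c3 : Char) (r : List Char) (bound : Int) (start : List Char)
    (h3 : (c3.toNat : Int) + 1 ≤ bound) :
    pvLoopA bound start ([c0]::[c1]::[c2]::[c3]::r.map (fun c => [c])) 3 =
      [c0]::[c1]::[c2]::[Char.ofNat (c3.toNat + 1)]::r.map (fun c => [c]) := by
  have hb3 : ¬ (bound ≤ (c3.toNat : Int)) := by omega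
  simp [pvLoopA, PySem.List.pyGet?, PySem.List.pyIdx?, hb3,
    (by omega : (3:Int) ≤ (r.length:Int) + 1 + 1 + 1)]

theorem pvLoopA_case1 (c0 c1 c2 c3 : Char) (r : List Char) (bound : Int) (start : List Char)
    (h3 : ¬ ((c3.toNat : Int) + 1 ≤ bound)) (h2 : (c2.toNat : Int) + 1 ≤ bound) :
    pvLoopA bound start ([c0]::[c1]::[c2]::[c3]::r.map (fun c => [c])) 3 =
      [c0]::[c1]::[Char.ofNat (c2.toNat + 1)]::start::r.map (fun c => [c]) := by
  have hb3 : bound ≤ (c3.toNat : Int) := by omega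
  have hb2 : ¬ (bound ≤ (c2.toNat : Int)) := by omega
  simp [pvLoopA, PySem.List.pyGet?, PySem.List.pyIdx?, hb3, hb2,
    (by omega : (3:Int) ≤ (r.length:Int) + 1 + 1 + 1),
    (by omega : (2:Int) ≤ (r.length:Int) + 1 + 1 + 1)]

theorem pvLoopA_case2 (c0 c1 c2 c3 : Char) (r : List Char) (bound : Int) (start : List Char)
    (h3 : ¬ ((c3.toNat : Int) + 1 ≤ bound)) (h2 : ¬ ((c2.toNat : Int) + 1 ≤ bound))
    (h1 : (c1.toNat : Int) + 1 ≤ bound) :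
    pvLoopA bound start ([c0]::[c1]::[c2]::[c3]::r.map (fun c => [c])) 3 =
      [c0]::[Char.ofNat (c1.toNat + 1)]::start::start::r.map (fun c => [c]) := by
  have hb3 : bound ≤ (c3.toNat : Int) := by omega
  have hb2 : bound ≤ (c2.toNat : Int) := by omega
  have hb1 : ¬ (bound ≤ (c1.toNat : Int)) := by omega
  simp [pvLoopA, PySem.List.pyGet?, PySem.List.pyIdx?, hb3, hb2, hb1,
    (by omega : (3:Int) ≤ (r.length:Int) + 1 + 1 + 1),
    (by omega : (2:Int) ≤ (r.length:Int) + 1 + 1 + 1),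
    (by omega : (1:Int) ≤ (r.length:Int) + 1 + 1 + 1),
    (by omega : (0:Int) ≤ (r.length:Int) + 1 + 1),
    (by omega : (0:Int) ≤ (r.length:Int) + 1 + 1 + 1)]

theorem pvLoopA_case3 (c0 c1 c2 c3 : Char) (r : List Char) (bound : Int) (start : List Char)
    (h3 : ¬ ((c3.toNat : Int) + 1 ≤ bound)) (h2 : ¬ ((c2.toNat : Int) + 1 ≤ bound))
    (h1 : ¬ ((c1.toNat : Int) + 1 ≤ bound)) (h0 : (c0.toNat : Int) + 1 ≤ bound) :
    pvLoopA bound start ([c0]::[c1]::[c2]::[c3]::r.map (fun c => [c])) 3 =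
      [Char.ofNat (c0.toNat + 1)]::start::start::start::r.map (fun c => [c]) := by
  have hb3 : bound ≤ (c3.toNat : Int) := by omega
  have hb2 : bound ≤ (c2.toNat : Int) := by omega
  have hb1 : bound ≤ (c1.toNat : Int) := by omega
  have hb0 : ¬ (bound ≤ (c0.toNat : Int)) := by omega
  simp [pvLoopA, PySem.List.pyGet?, PySem.List.pyIdx?, hb3, hb2, hb1, hb0,
    (by omega : (3:Int) ≤ (r.length:Int) + 1 + 1 + 1),
    (by omega : (2:Int) ≤ (r.length:Int) + 1 + 1 + 1),
    (by omega : (1:Int) ≤ (r.length:Int) + 1 + 1 + 1),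
    (by omega : (0:Int) ≤ (r.length:Int) + 1 + 1),
    (by omega : (0:Int) ≤ (r.length:Int) + 1 + 1 + 1)]

theorem pvLoopA_case4 (c0 c1 c2 c3 : Char) (r : List Char) (bound : Int) (start : List Char)
    (h3 : ¬ ((c3.toNat : Int) + 1 ≤ bound)) (h2 : ¬ ((c2.toNat : Int) + 1 ≤ bound))
    (h1 : ¬ ((c1.toNat : Int) + 1 ≤ bound)) (h0 : ¬ ((c0.toNat : Int) + 1 ≤ bound)) :
    pvLoopA bound start ([c0]::[c1]::[c2]::[c3]::r.map (fun c => [c])) 3 =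
      start::start::start::start::r.map (fun c => [c]) := by
  have hb3 : bound ≤ (c3.toNat : Int) := by omega
  have hb2 : bound ≤ (c2.toNat : Int) := by omega
  have hb1 : bound ≤ (c1.toNat : Int) := by omega
  have hb0 : bound ≤ (c0.toNat : Int) := by omega
  simp [pvLoopA, PySem.List.pyGet?, PySem.List.pyIdx?, hb3, hb2, hb1, hb0,
    (by omega : (3:Int) ≤ (r.length:Int) + 1 + 1 + 1),
    (by omega : (2:Int) ≤ (r.length:Int) + 1 + 1 + 1),
    (by omega : (1:Int) ≤ (r.length:Int) + 1 + 1 + 1),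
    (by omega : (0:Int) ≤ (r.length:Int) + 1 + 1),
    (by omega : (0:Int) ≤ (r.length:Int) + 1 + 1 + 1)]

theorem pv_flatten_singletons (r : List Char) : (r.map (fun c => [c])).flatten = r := by
  induction r <;> simp_all

-- ===== VERDICT (by name: the statement is the Claim_ definition above) =====
theorem get_next_unit_code_spec : Claim_equal_get_next_unit_code := by
  intro u bound start _ hpre
  unfold Spec_get_next_unit_code
  unfold Pre_get_next_unit_code at hpre
  obtain ⟨c0, c1, c2, c3, r, hu⟩ : ∃ c0 c1 c2 c3 r, u.toList = c0::c1::c2::c3::r := by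
    match h : u.toList with
    | a::b::c::d::r => exact ⟨a,b,c,d,r,rfl⟩
    | [] | [_] | [_,_] | [_,_,_] => rw [h] at hpre; simp at hpre
  unfold get_next_unit_code get_next_unit_code_alt
  rw [hu]
  have htail : PySem.List.slice (c0::c1::c2::c3::r) (some 4) none = r := by
    rw [show (4:Int) = ((4:Nat):Int) by norm_num, PySem.List.slice_from_natCast]; rfl
  simp only [List.map_cons, htail]
  by_cases h3 : (c3.toNat : Int) + 1 ≤ bound
  · rw [pvLoopA_case0 c0 c1 c2 c3 r bound start.toList h3]
    simp [pv_join_nil_flatten, pv_flatten_singletons, List.range_succ,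
      decide_eq_false (show ¬ bound ≤ (c3.toNat : Int) by omega)]
  · by_cases h2 : (c2.toNat : Int) + 1 ≤ bound
    · rw [pvLoopA_case1 c0 c1 c2 c3 r bound start.toList h3 h2]
      simp [pv_join_nil_flatten, pv_flatten_singletons, List.range_succ,
        decide_eq_true (show bound ≤ (c3.toNat : Int) by omega),
        decide_eq_false (show ¬ bound ≤ (c2.toNat : Int) by omega)]
    · by_cases h1 : (c1.toNat : Int) + 1 ≤ bound
      · rw [pvLoopA_case2 c0 c1 c2 c3 r bound start.toList h3 h2 h1]
        simp [pv_join_nil_flatten, pv_flatten_singletons, List.range_succ,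
          decide_eq_true (show bound ≤ (c3.toNat : Int) by omega),
          decide_eq_true (show bound ≤ (c2.toNat : Int) by omega),
          decide_eq_false (show ¬ bound ≤ (c1.toNat : Int) by omega)]
      · by_cases h0 : (c0.toNat : Int) + 1 ≤ bound
        · rw [pvLoopA_case3 c0 c1 c2 c3 r bound start.toList h3 h2 h1 h0]
          simp [pv_join_nil_flatten, pv_flatten_singletons, List.range_succ,
            decide_eq_true (show bound ≤ (c3.toNat : Int) by omega),
            decide_eq_true (show bound ≤ (c2.toNat : Int) by omega),
            decide_eq_true (show bound ≤ (c1.toNat : Int) by omega),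
            decide_eq_false (show ¬ bound ≤ (c0.toNat : Int) by omega)]
        · rw [pvLoopA_case4 c0 c1 c2 c3 r bound start.toList h3 h2 h1 h0]
          simp [pv_join_nil_flatten, pv_flatten_singletons, List.range_succ,
            decide_eq_true (show bound ≤ (c3.toNat : Int) by omega),
            decide_eq_true (show bound ≤ (c2.toNat : Int) by omega),
            decide_eq_true (show bound ≤ (c1.toNat : Int) by omega),
            decide_eq_true (show bound ≤ (c0.toNat : Int) by omega)]
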